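-- pv_equiv track=rewrite | github.com/sudhirsinghshekhawat/problem_solving | leetcode/minNumberMoves.py | min_no_moves
-- ===== SOURCE A (Python) =====
-- from typing import List
--
-- def min_no_moves(nums: List[int]) -> int:
--     left = 0
--     right = len(nums) - 1
--     moves_count = 0
--     nums.sort()
--
--     while left < right:
--         moves_count += nums[right] - nums[left]
--         left += 1
--         right -= 1
--
--     return moves_count
-- ===== SOURCE B (Python) =====
-- def min_no_moves(nums):
--     nums.sort()
--     if not nums:
--         return 0
--     median = nums[len(nums) // 2]
--     return sum(abs(x - median) for x in nums)
-- ===== Notes on version B (the rewrite author's own statement) =====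
-- stated objective: alternative
-- what changed: Replaces the inward-converging two-pointer pairwise-difference loop with the median-based formulation: sort, pick the middle element, and accumulate the absolute deviation of every element from it in one linear pass (valid because the minimum total move count equals the sum of distances to a median).
import Mathlib
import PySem

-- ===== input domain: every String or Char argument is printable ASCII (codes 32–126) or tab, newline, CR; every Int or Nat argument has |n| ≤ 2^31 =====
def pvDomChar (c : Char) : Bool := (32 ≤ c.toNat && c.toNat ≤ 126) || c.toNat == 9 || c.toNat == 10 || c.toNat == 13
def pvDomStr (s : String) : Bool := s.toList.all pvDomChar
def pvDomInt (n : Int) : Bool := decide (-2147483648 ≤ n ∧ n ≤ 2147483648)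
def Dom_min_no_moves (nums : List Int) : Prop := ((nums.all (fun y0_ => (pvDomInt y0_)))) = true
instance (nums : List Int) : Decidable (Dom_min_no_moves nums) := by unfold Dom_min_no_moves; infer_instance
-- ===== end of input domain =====

-- B replaces A's inward-converging two-pointer pairwise loop with the median formulation:
-- sort, take the middle element, sum the absolute deviations from it (objective: alternative).
-- Both A and B sort the argument list in place; the theorems are about the RETURN value
-- (the in-place sort side effect is identical in A and B).

-- ===== PORT A =====
-- the while loop: moves_count += nums[right] - nums[left]; left += 1; right -= 1
def minMovesLoop (s : List Int) (left right acc : Int) : Int :=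
  if left < right then
    minMovesLoop s (left + 1) (right - 1)
      (acc + (PySem.List.pyGetD s right 0 - PySem.List.pyGetD s left 0))
  else acc
termination_by (right - left).toNat
decreasing_by omega

def min_no_moves (nums : List Int) : Int :=
  let s := PySem.List.sorted nums (fun x => x) false
  minMovesLoop s 0 ((nums.length : Int) - 1) 0

-- ===== PORT B =====
def min_no_moves_alt (nums : List Int) : Int :=
  let s := PySem.List.sorted nums (fun x => x) false
  if s = [] then 0
  else
    -- median = nums[len(nums) // 2]  (index n/2 is in range since the list is nonempty)
    let m := PySem.List.pyGetD s ((nums.length / 2 : Nat) : Int) 0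
    -- sum(abs(x - median) for x in nums)
    (s.map (fun x => |x - m|)).sum

-- ===== PRECONDITION & SPEC =====
def Spec_min_no_moves (nums : List Int) (out : Int) : Prop := out = min_no_moves_alt nums
instance (nums : List Int) (out : Int) : Decidable (Spec_min_no_moves nums out) := by unfold Spec_min_no_moves; infer_instance

-- ===== CLAIM (what is proved, stated in full; the proofs are below) =====
def Claim_equal_min_no_moves : Prop := ∀ (nums : List Int), Dom_min_no_moves nums → Spec_min_no_moves nums (min_no_moves nums)

-- ===== LEMMAS AND PROOFS =====

-- the two-pointer loop computes the sum of symmetric index differences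
lemma minMovesLoop_eq (s : List Int) (m : Nat) :
    ∀ (L R : Nat) (acc : Int), R - L = m →
      minMovesLoop s (L : Int) (R : Int) acc
        = acc + ∑ i ∈ Finset.range ((R + 1 - L) / 2),
            (s.getD (R - i) 0 - s.getD (L + i) 0) := by
  induction m using Nat.strong_induction_on with
  | _ m ih =>
    intro L R acc hm
    by_cases hLR : L < R
    · have hstep : minMovesLoop s (L : Int) (R : Int) acc
          = minMovesLoop s ((L : Int) + 1) ((R : Int) - 1)
              (acc + (PySem.List.pyGetD s (R : Int) 0 - PySem.List.pyGetD s (L : Int) 0)) := by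
        rw [minMovesLoop, if_pos (show (L : Int) < (R : Int) by exact_mod_cast hLR)]
      have hcastL : (L : Int) + 1 = ((L + 1 : Nat) : Int) := by push_cast; ring
      have hcastR : (R : Int) - 1 = ((R - 1 : Nat) : Int) := by omega
      rw [hstep, hcastL, hcastR,
        ih ((R - 1) - (L + 1)) (by omega) (L + 1) (R - 1) _ rfl]
      simp only [PySem.List.pyGetD_natCast]
      have hsz : (R + 1 - L) / 2 = ((R - 1) + 1 - (L + 1)) / 2 + 1 := by omega
      rw [hsz, Finset.sum_range_succ']
      have hix : ∀ i : Nat, R - (i + 1) = (R - 1) - i := by omega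
      simp only [Nat.sub_zero, Nat.add_zero]
      have : ∀ i ∈ Finset.range (((R - 1) + 1 - (L + 1)) / 2),
          s.getD (R - (i + 1)) 0 - s.getD (L + (i + 1)) 0
            = s.getD ((R - 1) - i) 0 - s.getD ((L + 1) + i) 0 := by
        intro i _; rw [hix i]; ring_nf
      rw [Finset.sum_congr rfl this]
      ring
    · rw [minMovesLoop, if_neg (show ¬ (L : Int) < (R : Int) by exact_mod_cast hLR)]
      have h0 : (R + 1 - L) / 2 = 0 := by omega
      rw [h0]
      simp

lemma sum_range_getD_take (s : List Int) (h : Nat) (hh : h ≤ s.length) :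
    (∑ i ∈ Finset.range h, s.getD i 0) = (s.take h).sum := by
  induction h with
  | zero => simp
  | succ k ih =>
    have hk : k < s.length := by omega
    rw [Finset.sum_range_succ, ih (by omega), List.sum_take_succ s k hk]
    simp [List.getD, List.getElem?_eq_getElem hk]

lemma sum_range_getD_drop (s : List Int) (h : Nat) (hh : h ≤ s.length) :
    (∑ i ∈ Finset.range h, s.getD (s.length - 1 - i) 0) = (s.drop (s.length - h)).sum := by
  induction h with
  | zero => simp
  | succ k ih =>
    have hk : s.length - k - 1 < s.length := by omega
    rw [Finset.sum_range_succ, ih (by omega),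
      List.drop_eq_getElem_cons (by omega : s.length - (k + 1) < s.length)]
    have h1 : s.length - (k + 1) + 1 = s.length - k := by omega
    have h2 : s.length - 1 - k = s.length - (k + 1) := by omega
    rw [h1, h2]
    simp [List.getD, List.getElem?_eq_getElem (by omega : s.length - (k+1) < s.length)]
    ring

-- A's loop on any list s equals sum of top n-h..n indices minus bottom h indices (h = n/2)
lemma minMoves_core (s : List Int) (n : Nat) (hlen : s.length = n) :
    minMovesLoop s 0 ((n : Int) - 1) 0
      = (s.drop (n - n / 2)).sum - (s.take (n / 2)).sum := by
  rcases Nat.eq_zero_or_pos n with h0 | hpos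
  · have : s = [] := List.eq_nil_of_length_eq_zero (by omega)
    subst this
    rw [minMovesLoop, if_neg (by omega : ¬ (0 : Int) < (n : Int) - 1)]
    simp [h0]
  · have hcastR : (n : Int) - 1 = ((n - 1 : Nat) : Int) := by omega
    have hloop := minMovesLoop_eq s ((n - 1) - 0) 0 (n - 1) 0 rfl
    simp only [Nat.cast_zero] at hloop
    rw [hcastR, hloop]
    have hsz : ((n - 1) + 1 - 0) / 2 = n / 2 := by omega
    rw [hsz, zero_add, Finset.sum_sub_distrib]
    have hd : (∑ i ∈ Finset.range (n / 2), s.getD (n - 1 - i) 0)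
        = (s.drop (n - n / 2)).sum := by
      have := sum_range_getD_drop s (n / 2) (by omega)
      rwa [hlen] at this
    have ht : (∑ i ∈ Finset.range (n / 2), s.getD (0 + i) 0)
        = (s.take (n / 2)).sum := by
      simp only [Nat.zero_add]
      exact sum_range_getD_take s (n / 2) (by omega)
    rw [hd, ht]

lemma map_const_sub_sum (l : List Int) (m : Int) :
    (l.map (fun x => m - x)).sum = (l.length : Int) * m - l.sum := by
  induction l with
  | nil => simp
  | cons a t ih => simp [ih]; ring

lemma map_sub_const_sum (l : List Int) (m : Int) :
    (l.map (fun x => x - m)).sum = l.sum - (l.length : Int) * m := by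
  induction l with
  | nil => simp
  | cons a t ih => simp [ih]; ring

-- B's absolute-deviation sum, on a sorted list s with median m = s[n/2],
-- equals the same top-minus-bottom quantity
lemma absdev_core (s : List Int) (n : Nat) (hlen : s.length = n) (hpos : 0 < n)
    (hmono : ∀ p q : Nat, (hpq : p ≤ q) → (hq : q < s.length) →
        s[p]'(by omega) ≤ s[q]'hq) :
    (s.map (fun x => |x - s.getD (n / 2) 0|)).sum
      = (s.drop (n - n / 2)).sum - (s.take (n / 2)).sum := by
  set h := n / 2 with hh
  have hhn : h < n := by omega
  have hm : s.getD h 0 = s[h]'(by omega) := by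
    simp [List.getD, List.getElem?_eq_getElem (show h < s.length by omega)]
  set m := s.getD h 0 with hmdef
  -- split s as take h ++ drop h
  have hsplit : s.map (fun x => |x - m|)
      = (s.take h).map (fun x => |x - m|) ++ (s.drop h).map (fun x => |x - m|) := by
    rw [← List.map_append, List.take_append_drop]
  -- on the bottom part every element is ≤ m
  have htake : (s.take h).map (fun x => |x - m|) = (s.take h).map (fun x => m - x) := by
    apply List.map_congr_left
    intro x hx
    rw [List.mem_iff_getElem] at hx
    obtain ⟨i, hi, hxi⟩ := hx
    have hi' : i < h := by
      have := List.length_take_le h s; omega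
    have hgx : x = s[i]'(by omega) := by
      rw [← hxi]; simp [List.getElem_take]
    have hle : x ≤ m := by
      rw [hgx, hm]
      exact hmono i h (by omega) (by omega)
    have : |x - m| = m - x := by rw [abs_of_nonpos (by omega)]; ring
    rw [this]
  -- on the top part every element is ≥ m
  have hdrop : (s.drop h).map (fun x => |x - m|) = (s.drop h).map (fun x => x - m) := by
    apply List.map_congr_left
    intro x hx
    rw [List.mem_iff_getElem] at hx
    obtain ⟨i, hi, hxi⟩ := hx
    have hgx : x = s[h + i]'(by simp at hi; omega) := by
      rw [← hxi]; simp [List.getElem_drop]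
    have hle : m ≤ x := by
      rw [hgx, hm]
      exact hmono h (h + i) (by omega) (by simp at hi; omega)
    rw [abs_of_nonneg (by omega)]
  rw [hsplit, List.sum_append, htake, hdrop, map_const_sub_sum, map_sub_const_sum]
  have hlt : (s.take h).length = h := by simp; omega
  have hld : (s.drop h).length = n - h := by simp; omega
  rw [hlt, hld]
  -- relate drop h to drop (n - h): equal for even n, one extra m in front for odd n
  rcases Nat.even_or_odd n with he | ho
  · have : n - h = h := by obtain ⟨k, hk⟩ := he; omega
    rw [this]; ring
  · have hnh : n - h = h + 1 := by obtain ⟨k, hk⟩ := ho; omega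
    have hcons : s.drop h = s[h]'(by omega) :: s.drop (h + 1) :=
      List.drop_eq_getElem_cons (by omega)
    rw [hnh, hcons]
    simp only [List.sum_cons]
    rw [← hm]
    push_cast
    ring

-- ===== VERDICT (by name: the statement is the Claim_ definition above) =====
theorem min_no_moves_spec : Claim_equal_min_no_moves := by
  intro nums _
  unfold Spec_min_no_moves min_no_moves min_no_moves_alt
  set s := PySem.List.sorted nums (fun x => x) false with hs
  have hlen : s.length = nums.length := PySem.List.length_sorted ..
  by_cases hnil : s = []
  · rw [if_pos hnil]
    have h0 : nums.length = 0 := by rw [← hlen, hnil]; rfl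
    rw [minMoves_core s nums.length hlen]
    simp [hnil]
  · rw [if_neg hnil]
    have hpos : 0 < nums.length := by
      rw [← hlen]; exact List.length_pos_of_ne_nil hnil
    have hmono : ∀ p q : Nat, (hpq : p ≤ q) → (hq : q < s.length) → s[p]'(by omega) ≤ s[q]'hq := by
      intro p q hpq hq
      exact PySem.List.sorted_id_getElem_mono nums hpq (by rw [← hs]; omega)
    rw [minMoves_core s nums.length hlen, PySem.List.pyGetD_natCast,
      ← absdev_core s nums.length hlen hpos hmono]
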